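-- pv_equiv track=rewrite | github.com/bstanton773/kekambas-111_week7_day2 | whiteboard.py | solution
-- ===== SOURCE A (Python) =====
-- def solution(nums_list):
--     # write your code here
--     new_list = []
--     for i in range(len(nums_list)):
--         if i % 2:
--             new_list.append(nums_list[i] * 2)
--         else:
--             new_list.append(nums_list[i])
--     return new_list
-- ===== SOURCE B (Python) =====
-- def solution(nums_list):
--     new_list = list(nums_list)
--     new_list[1::2] = [x * 2 for x in new_list[1::2]]
--     return new_list
-- ===== Notes on version B (the rewrite author's own statement) =====
-- stated objective: idiomatic
-- what changed: Replaces the index loop with a per-element parity branch by a copy followed by a single slice assignment that doubles the odd-index stride new_list[1::2].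
import Mathlib
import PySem

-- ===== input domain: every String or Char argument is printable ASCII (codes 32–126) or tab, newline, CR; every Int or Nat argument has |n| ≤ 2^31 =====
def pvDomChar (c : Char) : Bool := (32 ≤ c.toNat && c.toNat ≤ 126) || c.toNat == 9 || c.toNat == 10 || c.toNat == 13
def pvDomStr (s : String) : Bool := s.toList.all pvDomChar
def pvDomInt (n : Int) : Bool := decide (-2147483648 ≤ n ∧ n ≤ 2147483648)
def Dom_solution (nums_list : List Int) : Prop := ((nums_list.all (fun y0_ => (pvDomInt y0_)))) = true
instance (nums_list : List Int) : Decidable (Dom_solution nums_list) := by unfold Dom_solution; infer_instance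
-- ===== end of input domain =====

-- B replaces A's index loop with parity branch by a copy plus one slice assignment on the odd stride (idiomatic).

-- ===== PORT A =====
-- for i in range(len(nums_list)): if i % 2: append(nums_list[i]*2) else: append(nums_list[i])
def solution (nums_list : List Int) : List Int :=
  (PySem.List.pyRange 0 nums_list.length 1).foldl
    (fun new_list i =>
      if PySem.Int.mod i 2 ≠ 0 then new_list ++ [PySem.List.pyGetD nums_list i 0 * 2]
      else new_list ++ [PySem.List.pyGetD nums_list i 0])
    []

-- ===== PORT B =====
-- hand port of the stride slice xs[1::2]: every second element starting at index 1
-- (exact: for any list, Python's xs[1::2] is the elements at indices 1,3,5,…)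
def strideOdd : List Int → List Int
  | [] => []
  | [_] => []
  | _ :: b :: rest => b :: strideOdd rest

-- hand port of the slice assignment new_list[1::2] = vs (exact when vs has exactly
-- as many elements as the odd stride, which B guarantees)
def writeOdd : List Int → List Int → List Int
  | a :: _ :: rest, v :: vs => a :: v :: writeOdd rest vs
  | xs, _ => xs

def solution_alt (nums_list : List Int) : List Int :=
  let new_list := nums_list
  writeOdd new_list ((strideOdd new_list).map (fun x => x * 2))

-- ===== PRECONDITION & SPEC =====
def Spec_solution (nums_list : List Int) (out : List Int) : Prop := out = solution_alt nums_list
instance (nums_list : List Int) (out : List Int) : Decidable (Spec_solution nums_list out) := by unfold Spec_solution; infer_instance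

-- ===== CLAIM (what is proved, stated in full; the proofs are below) =====
def Claim_equal_solution : Prop := ∀ (nums_list : List Int), Dom_solution nums_list → Spec_solution nums_list (solution nums_list)

-- ===== LEMMAS AND PROOFS =====

-- canonical two-at-a-time description both ports are reduced to
def pairs : List Int → List Int
  | [] => []
  | [a] => [a]
  | a :: b :: rest => a :: b * 2 :: pairs rest

lemma alt_eq_pairs (nl : List Int) : solution_alt nl = pairs nl := by
  induction nl using pairs.induct with
  | case1 => rfl
  | case2 a => rfl
  | case3 a b rest ih =>
      simp only [solution_alt, strideOdd, writeOdd, List.map, pairs] at *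
      rw [ih]

lemma sol_map (nl : List Int) :
    solution nl = (List.range nl.length).map
      (fun (k : Nat) => if ((k : Int)) % 2 ≠ 0 then nl.getD k 0 * 2 else nl.getD k 0) := by
  have hstep : (fun (new_list : List Int) (i : Int) =>
      if PySem.Int.mod i 2 ≠ 0 then new_list ++ [PySem.List.pyGetD nl i 0 * 2]
      else new_list ++ [PySem.List.pyGetD nl i 0])
      = fun new_list i => new_list ++
          [if PySem.Int.mod i 2 ≠ 0 then PySem.List.pyGetD nl i 0 * 2 else PySem.List.pyGetD nl i 0] := by
    funext acc i; split <;> rfl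
  simp only [solution, hstep, PySem.List.foldl_append_singleton_eq_map, List.nil_append]
  rw [PySem.List.pyRange_one]
  simp only [List.map_map, Int.sub_zero, Int.toNat_natCast]
  refine List.map_congr_left ?_
  intro k _
  simp

lemma sol_eq_pairs (nl : List Int) : solution nl = pairs nl := by
  rw [sol_map]
  induction nl using pairs.induct with
  | case1 => rfl
  | case2 a => simp [pairs]
  | case3 a b rest ih =>
      show (List.range (rest.length + 1 + 1)).map _ = _
      rw [List.range_succ_eq_map, List.range_succ_eq_map]
      simp only [List.map_cons, List.map_map, pairs]
      rw [← ih]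
      congr 1
      congr 1
      norm_num
      intro k hk
      have h2 : ((k : Int) + 1 + 1) % 2 = (k : Int) % 2 := by omega
      rw [h2]

-- ===== VERDICT (by name: the statement is the Claim_ definition above) =====
theorem solution_spec : Claim_equal_solution := by
  intro nl _
  show solution nl = solution_alt nl
  rw [sol_eq_pairs, alt_eq_pairs]
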